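-- pv_equiv track=rewrite | github.com/Lukifuki1/Kameleon | extracted_content/COMPLETE_CENTER/gisc-backend/app/local_threat_intel.py | _map_threat_category
-- ===== SOURCE A (Python) =====
-- from typing import List, Dict, Any, Optional, Set, Tuple
-- from enum import Enum
--
-- class ThreatCategory(str, Enum):
--     MALWARE = "malware"
--     BOTNET = "botnet"
--     C2 = "c2"
--     PHISHING = "phishing"
--     RANSOMWARE = "ransomware"
--     EXPLOIT = "exploit"
--     APT = "apt"
--     SPAM = "spam"
--     SCANNER = "scanner"
--     BRUTEFORCE = "bruteforce"
--     CRYPTOMINER = "cryptominer"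
--     RAT = "rat"
--     STEALER = "stealer"
--     LOADER = "loader"
--     DROPPER = "dropper"
--     BACKDOOR = "backdoor"
--     ROOTKIT = "rootkit"
--     WORM = "worm"
--     TROJAN = "trojan"
--     UNKNOWN = "unknown"
--
-- def _map_threat_category(threat_type: str, tags: List[str]) -> ThreatCategory:
--     """Map threat type to category"""
--     threat_type_lower = threat_type.lower()
--     tags_lower = [t.lower() for t in tags]
--
--     if "ransomware" in threat_type_lower or "ransomware" in tags_lower:
--         return ThreatCategory.RANSOMWARE
--     elif "botnet" in threat_type_lower or "botnet" in tags_lower: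
--         return ThreatCategory.BOTNET
--     elif "c2" in threat_type_lower or "c&c" in threat_type_lower:
--         return ThreatCategory.C2
--     elif "phishing" in threat_type_lower or "phishing" in tags_lower:
--         return ThreatCategory.PHISHING
--     elif "rat" in threat_type_lower or "rat" in tags_lower:
--         return ThreatCategory.RAT
--     elif "stealer" in threat_type_lower or "stealer" in tags_lower:
--         return ThreatCategory.STEALER
--     elif "loader" in threat_type_lower or "loader" in tags_lower:
--         return ThreatCategory.LOADER
--     elif "dropper" in threat_type_lower or "dropper" in tags_lower:
--         return ThreatCategory.DROPPER
--     elif "backdoor" in threat_type_lower or "backdoor" in tags_lower: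
--         return ThreatCategory.BACKDOOR
--     elif "trojan" in threat_type_lower or "trojan" in tags_lower:
--         return ThreatCategory.TROJAN
--     elif "miner" in threat_type_lower or "cryptominer" in tags_lower:
--         return ThreatCategory.CRYPTOMINER
--     else:
--         return ThreatCategory.MALWARE
-- ===== SOURCE B (Python) =====
-- from typing import List
-- from enum import Enum
--
-- class ThreatCategory(str, Enum):
--     MALWARE = "malware"
--     BOTNET = "botnet"
--     C2 = "c2"
--     PHISHING = "phishing"
--     RANSOMWARE = "ransomware"
--     EXPLOIT = "exploit"
--     APT = "apt"
--     SPAM = "spam"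
--     SCANNER = "scanner"
--     BRUTEFORCE = "bruteforce"
--     CRYPTOMINER = "cryptominer"
--     RAT = "rat"
--     STEALER = "stealer"
--     LOADER = "loader"
--     DROPPER = "dropper"
--     BACKDOOR = "backdoor"
--     ROOTKIT = "rootkit"
--     WORM = "worm"
--     TROJAN = "trojan"
--     UNKNOWN = "unknown"
--
-- # Priority rank of each exact tag value (lower rank = higher priority; c2 has no tag rule).
-- _TAG_RANK = {"ransomware": 0, "botnet": 1, "phishing": 3, "rat": 4, "stealer": 5,
--              "loader": 6, "dropper": 7, "backdoor": 8, "trojan": 9, "cryptominer": 10}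
-- # Priority rank of each substring sought in the threat type.
-- _SUB_RANK = [("ransomware", 0), ("botnet", 1), ("c2", 2), ("c&c", 2), ("phishing", 3),
--              ("rat", 4), ("stealer", 5), ("loader", 6), ("dropper", 7), ("backdoor", 8),
--              ("trojan", 9), ("miner", 10)]
-- # Category by rank; rank 11 = nothing matched.
-- _CATS = ["ransomware", "botnet", "c2", "phishing", "rat", "stealer", "loader",
--          "dropper", "backdoor", "trojan", "cryptominer", "malware"]
--
-- def _map_threat_category(threat_type: str, tags: List[str]) -> ThreatCategory:
--     """Take the minimum priority rank over all matches, then index the category table."""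
--     tt = threat_type.lower()
--     best = 11
--     for tg in tags:
--         best = min(best, _TAG_RANK.get(tg.lower(), 11))
--     for sub, rk in _SUB_RANK:
--         if sub in tt:
--             best = min(best, rk)
--     return ThreatCategory(_CATS[best])
-- ===== Notes on version B (the rewrite author's own statement) =====
-- stated objective: alternative
-- what changed: Instead of A's ordered if/elif cascade of per-rule checks, B computes the minimum priority rank over all matches: one pass over the tags with a rank dictionary (no per-rule membership scans), one pass over a substring/rank table, then indexes a category array by the best rank.
import Mathlib
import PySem

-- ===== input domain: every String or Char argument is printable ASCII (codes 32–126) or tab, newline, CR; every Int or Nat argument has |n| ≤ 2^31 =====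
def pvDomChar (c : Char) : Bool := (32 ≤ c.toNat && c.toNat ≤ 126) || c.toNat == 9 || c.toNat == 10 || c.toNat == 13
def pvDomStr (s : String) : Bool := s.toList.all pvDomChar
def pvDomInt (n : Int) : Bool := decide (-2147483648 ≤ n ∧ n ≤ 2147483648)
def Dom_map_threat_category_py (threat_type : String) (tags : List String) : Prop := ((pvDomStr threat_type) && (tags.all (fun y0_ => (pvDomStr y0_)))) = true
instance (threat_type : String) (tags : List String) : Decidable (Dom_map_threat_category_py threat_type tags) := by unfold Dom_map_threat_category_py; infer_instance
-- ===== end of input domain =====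

-- B replaces A's ordered if/elif cascade by a minimum-priority-rank computation (tag-rank dict pass
-- + substring/rank table pass + category-array index); objective: alternative (same cost, different algorithm).


-- ===== PORT A =====
def map_threat_category_py (threat_type : String) (tags : List String) : String :=
  let t := PySem.Str.lower threat_type
  let tl := tags.map PySem.Str.lower
  if PySem.Str.isIn "ransomware" t || tl.contains "ransomware" then "ransomware"
  else if PySem.Str.isIn "botnet" t || tl.contains "botnet" then "botnet"
  else if PySem.Str.isIn "c2" t || PySem.Str.isIn "c&c" t then "c2"
  else if PySem.Str.isIn "phishing" t || tl.contains "phishing" then "phishing"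
  else if PySem.Str.isIn "rat" t || tl.contains "rat" then "rat"
  else if PySem.Str.isIn "stealer" t || tl.contains "stealer" then "stealer"
  else if PySem.Str.isIn "loader" t || tl.contains "loader" then "loader"
  else if PySem.Str.isIn "dropper" t || tl.contains "dropper" then "dropper"
  else if PySem.Str.isIn "backdoor" t || tl.contains "backdoor" then "backdoor"
  else if PySem.Str.isIn "trojan" t || tl.contains "trojan" then "trojan"
  else if PySem.Str.isIn "miner" t || tl.contains "cryptominer" then "cryptominer"
  else "malware"

-- ===== PORT B =====
-- _TAG_RANK: priority rank of each exact tag value (no tag rule for rank 2 = c2)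
def pvTagRank : PySem.Dict String Nat :=
  PySem.Dict.mk [("ransomware", 0), ("botnet", 1), ("phishing", 3), ("rat", 4), ("stealer", 5),
                 ("loader", 6), ("dropper", 7), ("backdoor", 8), ("trojan", 9), ("cryptominer", 10)]

-- _SUB_RANK: priority rank of each substring sought in the threat type
def pvSubRank : List (String × Nat) :=
  [("ransomware", 0), ("botnet", 1), ("c2", 2), ("c&c", 2), ("phishing", 3),
   ("rat", 4), ("stealer", 5), ("loader", 6), ("dropper", 7), ("backdoor", 8),
   ("trojan", 9), ("miner", 10)]

-- _CATS: category by rank (rank 11 = nothing matched)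
def pvCats : List String :=
  ["ransomware", "botnet", "c2", "phishing", "rat", "stealer", "loader",
   "dropper", "backdoor", "trojan", "cryptominer", "malware"]

def map_threat_category_py_alt (threat_type : String) (tags : List String) : String :=
  let t := PySem.Str.lower threat_type
  let best0 := tags.foldl (fun b tg => min b (pvTagRank.getD (PySem.Str.lower tg) 11)) 11
  let best := pvSubRank.foldl (fun b p => if PySem.Str.isIn p.1 t then min b p.2 else b) best0
  pvCats.getD best "malware"   -- _CATS[best]; exact: best ≤ 11 always, so the index is in range

-- ===== PRECONDITION & SPEC =====
def Spec_map_threat_category_py (threat_type : String) (tags : List String) (out : String) : Prop := out = map_threat_category_py_alt threat_type tags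
instance (threat_type : String) (tags : List String) (out : String) : Decidable (Spec_map_threat_category_py threat_type tags out) := by unfold Spec_map_threat_category_py; infer_instance

-- ===== CLAIM =====
def Claim_equal_map_threat_category_py : Prop := ∀ (threat_type : String) (tags : List String), Dom_map_threat_category_py threat_type tags → Spec_map_threat_category_py threat_type tags (map_threat_category_py threat_type tags)

-- ===== LEMMAS AND PROOFS =====

-- the fold of B's tag loop is ≤ k iff the accumulator or some element's rank is
theorem pv_foldl_min_le_iff {α : Type} (f : α → Nat) (k : Nat) :
    ∀ (l : List α) (b : Nat),
      (l.foldl (fun b x => min b (f x)) b ≤ k) ↔ (b ≤ k ∨ ∃ x ∈ l, f x ≤ k) := by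
  intro l
  induction l with
  | nil => simp
  | cons x l ih =>
    intro b
    simp only [List.foldl_cons, ih, min_le_iff, List.mem_cons]
    aesop

-- the fold of B's substring loop is ≤ k iff the accumulator or some firing rule's rank is
theorem pv_foldl_min_if_le_iff {α : Type} (c : α → Bool) (f : α → Nat) (k : Nat) :
    ∀ (l : List α) (b : Nat),
      (l.foldl (fun b x => if c x then min b (f x) else b) b ≤ k) ↔
        (b ≤ k ∨ ∃ x ∈ l, c x = true ∧ f x ≤ k) := by
  intro l
  induction l with
  | nil => simp
  | cons x l ih =>
    intro b
    by_cases hc : c x = true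
    · simp only [List.foldl_cons, hc, if_true, ih, min_le_iff, List.mem_cons]
      aesop
    · simp only [List.foldl_cons, hc, ih, List.mem_cons]
      aesop

-- getD on an association list with distinct keys is ≤ k iff the key is present with rank ≤ k (k below the default)
theorem pv_getD_mk_le_iff : ∀ (l : List (String × Nat)), (l.map Prod.fst).Nodup →
    ∀ (s : String) (d k : Nat), ¬ d ≤ k →
      ((PySem.Dict.mk l).getD s d ≤ k ↔ ∃ p ∈ l, s = p.1 ∧ p.2 ≤ k) := by
  intro l
  induction l with
  | nil =>
    intro _ s d k hd
    simp [PySem.Dict.getD_eq_get?_getD, PySem.Dict.get?, hd]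
  | cons a l ih =>
    intro hnd s d k hd
    simp only [List.map_cons, List.nodup_cons] at hnd
    rw [PySem.Dict.getD_eq_get?_getD, PySem.Dict.get?_mk_cons]
    by_cases he : a.1 = s
    · subst he
      simp only [BEq.rfl, if_true, Option.getD_some]
      constructor
      · intro hv
        exact ⟨a, List.mem_cons_self, rfl, hv⟩
      · rintro ⟨p, hp, hsp, hpk⟩
        rcases List.mem_cons.mp hp with rfl | hp
        · exact hpk
        · exact absurd (hsp ▸ List.mem_map_of_mem hp) hnd.1
    · have hbe : (a.1 == s) = false := beq_false_of_ne he
      rw [hbe, if_neg (by simp), ← PySem.Dict.getD_eq_get?_getD,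
          ih hnd.2 s d k hd]
      constructor
      · rintro ⟨p, hp, hsp, hpk⟩
        exact ⟨p, List.mem_cons_of_mem _ hp, hsp, hpk⟩
      · rintro ⟨p, hp, hsp, hpk⟩
        rcases List.mem_cons.mp hp with rfl | hp
        · exact absurd hsp.symm he
        · exact ⟨p, hp, hsp, hpk⟩

-- specialization of pv_getD_mk_le_iff to the literal tag-rank dict
theorem pv_tagRank_getD_le_iff (s : String) (k : Nat) (hk : k ≤ 10) :
    (pvTagRank.getD s 11 ≤ k) ↔ ∃ p ∈ pvTagRank.items, s = p.1 ∧ p.2 ≤ k :=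
  pv_getD_mk_le_iff _ (by decide) s 11 k (by omega)

-- B's final rank is ≤ k (k ≤ 10) iff some substring rule of rank ≤ k fires on t
-- or some tag of rank ≤ k occurs among the lowered tags
theorem pv_best_le_iff (t : String) (tags : List String) (k : Nat) (hk : k ≤ 10) :
    (pvSubRank.foldl (fun b p => if PySem.Str.isIn p.1 t then min b p.2 else b)
        (tags.foldl (fun b tg => min b (pvTagRank.getD (PySem.Str.lower tg) 11)) 11) ≤ k) ↔
      ((∃ p ∈ pvSubRank, PySem.Str.isIn p.1 t = true ∧ p.2 ≤ k) ∨
       (∃ p ∈ pvTagRank.items, (tags.map PySem.Str.lower).contains p.1 = true ∧ p.2 ≤ k)) := by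
  rw [pv_foldl_min_if_le_iff, pv_foldl_min_le_iff]
  constructor
  · rintro ((h | htag) | hsub)
    · omega
    · obtain ⟨tg, htg, hrk⟩ := htag
      obtain ⟨p, hp, hep, hpk⟩ := (pv_tagRank_getD_le_iff _ k hk).mp hrk
      refine Or.inr ⟨p, hp, ?_, hpk⟩
      exact List.elem_eq_true_of_mem (hep ▸ List.mem_map.mpr ⟨tg, htg, rfl⟩)
    · exact Or.inl hsub
  · rintro (hsub | htag)
    · exact Or.inr hsub
    · obtain ⟨p, hp, hin, hrk⟩ := htag
      obtain ⟨tg, htg, heq⟩ := List.mem_map.mp (List.mem_of_elem_eq_true hin)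
      exact Or.inl (Or.inr ⟨tg, htg, (pv_tagRank_getD_le_iff _ k hk).mpr ⟨p, hp, heq, hrk⟩⟩)

-- B's final rank never exceeds 11
theorem pv_best_le_11 (t : String) (tags : List String) :
    pvSubRank.foldl (fun b p => if PySem.Str.isIn p.1 t then min b p.2 else b)
        (tags.foldl (fun b tg => min b (pvTagRank.getD (PySem.Str.lower tg) 11)) 11) ≤ 11 := by
  rw [pv_foldl_min_if_le_iff, pv_foldl_min_le_iff]
  exact Or.inl (Or.inl le_rfl)

-- ===== VERDICT =====
set_option maxHeartbeats 1000000 in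
theorem map_threat_category_py_spec : Claim_equal_map_threat_category_py := by
  intro tt tags _
  unfold Spec_map_threat_category_py map_threat_category_py map_threat_category_py_alt
  dsimp only
  obtain ⟨b, hbdef⟩ : ∃ x : Nat, pvSubRank.foldl
      (fun b p => if PySem.Str.isIn p.1 (PySem.Str.lower tt) then min b p.2 else b)
      (tags.foldl (fun b tg => min b (pvTagRank.getD (PySem.Str.lower tg) 11)) 11) = x := ⟨_, rfl⟩
  rw [hbdef]
  have hiff : ∀ k : Nat, k ≤ 10 → (b ≤ k ↔
      ((∃ p ∈ pvSubRank, PySem.Str.isIn p.1 (PySem.Str.lower tt) = true ∧ p.2 ≤ k) ∨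
       (∃ p ∈ pvTagRank.items, (tags.map PySem.Str.lower).contains p.1 = true ∧ p.2 ≤ k))) := by
    intro k hk
    rw [← hbdef]
    exact pv_best_le_iff (PySem.Str.lower tt) tags k hk
  have hub : b ≤ 11 := by rw [← hbdef]; exact pv_best_le_11 (PySem.Str.lower tt) tags
  split_ifs with h0 h1 h2 h3 h4 h5 h6 h7 h8 h9 h10
  · -- rank 0: ransomware
    have hle : b ≤ 0 := by
      refine (hiff 0 (by decide)).mpr ?_
      simp only [Bool.or_eq_true] at h0
      rcases h0 with hx | hx
      · exact Or.inl ⟨("ransomware", 0), by exact List.mem_cons_self, hx, by decide⟩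
      · exact Or.inr ⟨("ransomware", 0), by exact List.mem_cons_self, hx, by decide⟩
    have hbj : b = 0 := by omega
    rw [hbj]
    rfl
  · -- rank 1: botnet
    have hle : b ≤ 1 := by
      refine (hiff 1 (by decide)).mpr ?_
      simp only [Bool.or_eq_true] at h1
      rcases h1 with hx | hx
      · exact Or.inl ⟨("botnet", 1), by exact List.mem_cons_of_mem _ (List.mem_cons_self), hx, by decide⟩
      · exact Or.inr ⟨("botnet", 1), by exact List.mem_cons_of_mem _ (List.mem_cons_self), hx, by decide⟩
    have hne : ¬ b ≤ 0 := by
      intro hc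
      rcases (hiff 0 (by decide)).mp hc with ⟨p, hp, hin, hrk⟩ | ⟨p, hp, hin, hrk⟩
      · simp only [pvSubRank, List.mem_cons, List.not_mem_nil, or_false] at hp
        rcases hp with rfl|rfl|rfl|rfl|rfl|rfl|rfl|rfl|rfl|rfl|rfl|rfl
        · exact h0 (by rw [Bool.or_eq_true]; exact Or.inl hin)
        · exact absurd hrk (by decide)
        · exact absurd hrk (by decide)
        · exact absurd hrk (by decide)
        · exact absurd hrk (by decide)
        · exact absurd hrk (by decide)
        · exact absurd hrk (by decide)
        · exact absurd hrk (by decide)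
        · exact absurd hrk (by decide)
        · exact absurd hrk (by decide)
        · exact absurd hrk (by decide)
        · exact absurd hrk (by decide)
      · simp only [pvTagRank, List.mem_cons, List.not_mem_nil, or_false] at hp
        rcases hp with rfl|rfl|rfl|rfl|rfl|rfl|rfl|rfl|rfl|rfl
        · exact h0 (by rw [Bool.or_eq_true]; exact Or.inr hin)
        · exact absurd hrk (by decide)
        · exact absurd hrk (by decide)
        · exact absurd hrk (by decide)
        · exact absurd hrk (by decide)
        · exact absurd hrk (by decide)
        · exact absurd hrk (by decide)
        · exact absurd hrk (by decide)
        · exact absurd hrk (by decide)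
        · exact absurd hrk (by decide)
    have hbj : b = 1 := by omega
    rw [hbj]
    rfl
  · -- rank 2: c2
    have hle : b ≤ 2 := by
      refine (hiff 2 (by decide)).mpr ?_
      simp only [Bool.or_eq_true] at h2
      rcases h2 with hx | hx
      · exact Or.inl ⟨("c2", 2), by exact List.mem_cons_of_mem _ (List.mem_cons_of_mem _ (List.mem_cons_self)), hx, by decide⟩
      · exact Or.inl ⟨("c&c", 2), by exact List.mem_cons_of_mem _ (List.mem_cons_of_mem _ (List.mem_cons_of_mem _ (List.mem_cons_self))), hx, by decide⟩
    have hne : ¬ b ≤ 1 := by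
      intro hc
      rcases (hiff 1 (by decide)).mp hc with ⟨p, hp, hin, hrk⟩ | ⟨p, hp, hin, hrk⟩
      · simp only [pvSubRank, List.mem_cons, List.not_mem_nil, or_false] at hp
        rcases hp with rfl|rfl|rfl|rfl|rfl|rfl|rfl|rfl|rfl|rfl|rfl|rfl
        · exact h0 (by rw [Bool.or_eq_true]; exact Or.inl hin)
        · exact h1 (by rw [Bool.or_eq_true]; exact Or.inl hin)
        · exact absurd hrk (by decide)
        · exact absurd hrk (by decide)
        · exact absurd hrk (by decide)
        · exact absurd hrk (by decide)
        · exact absurd hrk (by decide)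
        · exact absurd hrk (by decide)
        · exact absurd hrk (by decide)
        · exact absurd hrk (by decide)
        · exact absurd hrk (by decide)
        · exact absurd hrk (by decide)
      · simp only [pvTagRank, List.mem_cons, List.not_mem_nil, or_false] at hp
        rcases hp with rfl|rfl|rfl|rfl|rfl|rfl|rfl|rfl|rfl|rfl
        · exact h0 (by rw [Bool.or_eq_true]; exact Or.inr hin)
        · exact h1 (by rw [Bool.or_eq_true]; exact Or.inr hin)
        · exact absurd hrk (by decide)
        · exact absurd hrk (by decide)
        · exact absurd hrk (by decide)
        · exact absurd hrk (by decide)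
        · exact absurd hrk (by decide)
        · exact absurd hrk (by decide)
        · exact absurd hrk (by decide)
        · exact absurd hrk (by decide)
    have hbj : b = 2 := by omega
    rw [hbj]
    rfl
  · -- rank 3: phishing
    have hle : b ≤ 3 := by
      refine (hiff 3 (by decide)).mpr ?_
      simp only [Bool.or_eq_true] at h3
      rcases h3 with hx | hx
      · exact Or.inl ⟨("phishing", 3), by exact List.mem_cons_of_mem _ (List.mem_cons_of_mem _ (List.mem_cons_of_mem _ (List.mem_cons_of_mem _ (List.mem_cons_self)))), hx, by decide⟩
      · exact Or.inr ⟨("phishing", 3), by exact List.mem_cons_of_mem _ (List.mem_cons_of_mem _ (List.mem_cons_self)), hx, by decide⟩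
    have hne : ¬ b ≤ 2 := by
      intro hc
      rcases (hiff 2 (by decide)).mp hc with ⟨p, hp, hin, hrk⟩ | ⟨p, hp, hin, hrk⟩
      · simp only [pvSubRank, List.mem_cons, List.not_mem_nil, or_false] at hp
        rcases hp with rfl|rfl|rfl|rfl|rfl|rfl|rfl|rfl|rfl|rfl|rfl|rfl
        · exact h0 (by rw [Bool.or_eq_true]; exact Or.inl hin)
        · exact h1 (by rw [Bool.or_eq_true]; exact Or.inl hin)
        · exact h2 (by rw [Bool.or_eq_true]; exact Or.inl hin)
        · exact h2 (by rw [Bool.or_eq_true]; exact Or.inr hin)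
        · exact absurd hrk (by decide)
        · exact absurd hrk (by decide)
        · exact absurd hrk (by decide)
        · exact absurd hrk (by decide)
        · exact absurd hrk (by decide)
        · exact absurd hrk (by decide)
        · exact absurd hrk (by decide)
        · exact absurd hrk (by decide)
      · simp only [pvTagRank, List.mem_cons, List.not_mem_nil, or_false] at hp
        rcases hp with rfl|rfl|rfl|rfl|rfl|rfl|rfl|rfl|rfl|rfl
        · exact h0 (by rw [Bool.or_eq_true]; exact Or.inr hin)
        · exact h1 (by rw [Bool.or_eq_true]; exact Or.inr hin)
        · exact absurd hrk (by decide)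
        · exact absurd hrk (by decide)
        · exact absurd hrk (by decide)
        · exact absurd hrk (by decide)
        · exact absurd hrk (by decide)
        · exact absurd hrk (by decide)
        · exact absurd hrk (by decide)
        · exact absurd hrk (by decide)
    have hbj : b = 3 := by omega
    rw [hbj]
    rfl
  · -- rank 4: rat
    have hle : b ≤ 4 := by
      refine (hiff 4 (by decide)).mpr ?_
      simp only [Bool.or_eq_true] at h4
      rcases h4 with hx | hx
      · exact Or.inl ⟨("rat", 4), by exact List.mem_cons_of_mem _ (List.mem_cons_of_mem _ (List.mem_cons_of_mem _ (List.mem_cons_of_mem _ (List.mem_cons_of_mem _ (List.mem_cons_self))))), hx, by decide⟩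
      · exact Or.inr ⟨("rat", 4), by exact List.mem_cons_of_mem _ (List.mem_cons_of_mem _ (List.mem_cons_of_mem _ (List.mem_cons_self))), hx, by decide⟩
    have hne : ¬ b ≤ 3 := by
      intro hc
      rcases (hiff 3 (by decide)).mp hc with ⟨p, hp, hin, hrk⟩ | ⟨p, hp, hin, hrk⟩
      · simp only [pvSubRank, List.mem_cons, List.not_mem_nil, or_false] at hp
        rcases hp with rfl|rfl|rfl|rfl|rfl|rfl|rfl|rfl|rfl|rfl|rfl|rfl
        · exact h0 (by rw [Bool.or_eq_true]; exact Or.inl hin)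
        · exact h1 (by rw [Bool.or_eq_true]; exact Or.inl hin)
        · exact h2 (by rw [Bool.or_eq_true]; exact Or.inl hin)
        · exact h2 (by rw [Bool.or_eq_true]; exact Or.inr hin)
        · exact h3 (by rw [Bool.or_eq_true]; exact Or.inl hin)
        · exact absurd hrk (by decide)
        · exact absurd hrk (by decide)
        · exact absurd hrk (by decide)
        · exact absurd hrk (by decide)
        · exact absurd hrk (by decide)
        · exact absurd hrk (by decide)
        · exact absurd hrk (by decide)
      · simp only [pvTagRank, List.mem_cons, List.not_mem_nil, or_false] at hp
        rcases hp with rfl|rfl|rfl|rfl|rfl|rfl|rfl|rfl|rfl|rfl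
        · exact h0 (by rw [Bool.or_eq_true]; exact Or.inr hin)
        · exact h1 (by rw [Bool.or_eq_true]; exact Or.inr hin)
        · exact h3 (by rw [Bool.or_eq_true]; exact Or.inr hin)
        · exact absurd hrk (by decide)
        · exact absurd hrk (by decide)
        · exact absurd hrk (by decide)
        · exact absurd hrk (by decide)
        · exact absurd hrk (by decide)
        · exact absurd hrk (by decide)
        · exact absurd hrk (by decide)
    have hbj : b = 4 := by omega
    rw [hbj]
    rfl
  · -- rank 5: stealer
    have hle : b ≤ 5 := by
      refine (hiff 5 (by decide)).mpr ?_
      simp only [Bool.or_eq_true] at h5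
      rcases h5 with hx | hx
      · exact Or.inl ⟨("stealer", 5), by exact List.mem_cons_of_mem _ (List.mem_cons_of_mem _ (List.mem_cons_of_mem _ (List.mem_cons_of_mem _ (List.mem_cons_of_mem _ (List.mem_cons_of_mem _ (List.mem_cons_self)))))), hx, by decide⟩
      · exact Or.inr ⟨("stealer", 5), by exact List.mem_cons_of_mem _ (List.mem_cons_of_mem _ (List.mem_cons_of_mem _ (List.mem_cons_of_mem _ (List.mem_cons_self)))), hx, by decide⟩
    have hne : ¬ b ≤ 4 := by
      intro hc
      rcases (hiff 4 (by decide)).mp hc with ⟨p, hp, hin, hrk⟩ | ⟨p, hp, hin, hrk⟩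
      · simp only [pvSubRank, List.mem_cons, List.not_mem_nil, or_false] at hp
        rcases hp with rfl|rfl|rfl|rfl|rfl|rfl|rfl|rfl|rfl|rfl|rfl|rfl
        · exact h0 (by rw [Bool.or_eq_true]; exact Or.inl hin)
        · exact h1 (by rw [Bool.or_eq_true]; exact Or.inl hin)
        · exact h2 (by rw [Bool.or_eq_true]; exact Or.inl hin)
        · exact h2 (by rw [Bool.or_eq_true]; exact Or.inr hin)
        · exact h3 (by rw [Bool.or_eq_true]; exact Or.inl hin)
        · exact h4 (by rw [Bool.or_eq_true]; exact Or.inl hin)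
        · exact absurd hrk (by decide)
        · exact absurd hrk (by decide)
        · exact absurd hrk (by decide)
        · exact absurd hrk (by decide)
        · exact absurd hrk (by decide)
        · exact absurd hrk (by decide)
      · simp only [pvTagRank, List.mem_cons, List.not_mem_nil, or_false] at hp
        rcases hp with rfl|rfl|rfl|rfl|rfl|rfl|rfl|rfl|rfl|rfl
        · exact h0 (by rw [Bool.or_eq_true]; exact Or.inr hin)
        · exact h1 (by rw [Bool.or_eq_true]; exact Or.inr hin)
        · exact h3 (by rw [Bool.or_eq_true]; exact Or.inr hin)
        · exact h4 (by rw [Bool.or_eq_true]; exact Or.inr hin)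
        · exact absurd hrk (by decide)
        · exact absurd hrk (by decide)
        · exact absurd hrk (by decide)
        · exact absurd hrk (by decide)
        · exact absurd hrk (by decide)
        · exact absurd hrk (by decide)
    have hbj : b = 5 := by omega
    rw [hbj]
    rfl
  · -- rank 6: loader
    have hle : b ≤ 6 := by
      refine (hiff 6 (by decide)).mpr ?_
      simp only [Bool.or_eq_true] at h6
      rcases h6 with hx | hx
      · exact Or.inl ⟨("loader", 6), by exact List.mem_cons_of_mem _ (List.mem_cons_of_mem _ (List.mem_cons_of_mem _ (List.mem_cons_of_mem _ (List.mem_cons_of_mem _ (List.mem_cons_of_mem _ (List.mem_cons_of_mem _ (List.mem_cons_self))))))), hx, by decide⟩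
      · exact Or.inr ⟨("loader", 6), by exact List.mem_cons_of_mem _ (List.mem_cons_of_mem _ (List.mem_cons_of_mem _ (List.mem_cons_of_mem _ (List.mem_cons_of_mem _ (List.mem_cons_self))))), hx, by decide⟩
    have hne : ¬ b ≤ 5 := by
      intro hc
      rcases (hiff 5 (by decide)).mp hc with ⟨p, hp, hin, hrk⟩ | ⟨p, hp, hin, hrk⟩
      · simp only [pvSubRank, List.mem_cons, List.not_mem_nil, or_false] at hp
        rcases hp with rfl|rfl|rfl|rfl|rfl|rfl|rfl|rfl|rfl|rfl|rfl|rfl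
        · exact h0 (by rw [Bool.or_eq_true]; exact Or.inl hin)
        · exact h1 (by rw [Bool.or_eq_true]; exact Or.inl hin)
        · exact h2 (by rw [Bool.or_eq_true]; exact Or.inl hin)
        · exact h2 (by rw [Bool.or_eq_true]; exact Or.inr hin)
        · exact h3 (by rw [Bool.or_eq_true]; exact Or.inl hin)
        · exact h4 (by rw [Bool.or_eq_true]; exact Or.inl hin)
        · exact h5 (by rw [Bool.or_eq_true]; exact Or.inl hin)
        · exact absurd hrk (by decide)
        · exact absurd hrk (by decide)
        · exact absurd hrk (by decide)
        · exact absurd hrk (by decide)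
        · exact absurd hrk (by decide)
      · simp only [pvTagRank, List.mem_cons, List.not_mem_nil, or_false] at hp
        rcases hp with rfl|rfl|rfl|rfl|rfl|rfl|rfl|rfl|rfl|rfl
        · exact h0 (by rw [Bool.or_eq_true]; exact Or.inr hin)
        · exact h1 (by rw [Bool.or_eq_true]; exact Or.inr hin)
        · exact h3 (by rw [Bool.or_eq_true]; exact Or.inr hin)
        · exact h4 (by rw [Bool.or_eq_true]; exact Or.inr hin)
        · exact h5 (by rw [Bool.or_eq_true]; exact Or.inr hin)
        · exact absurd hrk (by decide)
        · exact absurd hrk (by decide)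
        · exact absurd hrk (by decide)
        · exact absurd hrk (by decide)
        · exact absurd hrk (by decide)
    have hbj : b = 6 := by omega
    rw [hbj]
    rfl
  · -- rank 7: dropper
    have hle : b ≤ 7 := by
      refine (hiff 7 (by decide)).mpr ?_
      simp only [Bool.or_eq_true] at h7
      rcases h7 with hx | hx
      · exact Or.inl ⟨("dropper", 7), by exact List.mem_cons_of_mem _ (List.mem_cons_of_mem _ (List.mem_cons_of_mem _ (List.mem_cons_of_mem _ (List.mem_cons_of_mem _ (List.mem_cons_of_mem _ (List.mem_cons_of_mem _ (List.mem_cons_of_mem _ (List.mem_cons_self)))))))), hx, by decide⟩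
      · exact Or.inr ⟨("dropper", 7), by exact List.mem_cons_of_mem _ (List.mem_cons_of_mem _ (List.mem_cons_of_mem _ (List.mem_cons_of_mem _ (List.mem_cons_of_mem _ (List.mem_cons_of_mem _ (List.mem_cons_self)))))), hx, by decide⟩
    have hne : ¬ b ≤ 6 := by
      intro hc
      rcases (hiff 6 (by decide)).mp hc with ⟨p, hp, hin, hrk⟩ | ⟨p, hp, hin, hrk⟩
      · simp only [pvSubRank, List.mem_cons, List.not_mem_nil, or_false] at hp
        rcases hp with rfl|rfl|rfl|rfl|rfl|rfl|rfl|rfl|rfl|rfl|rfl|rfl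
        · exact h0 (by rw [Bool.or_eq_true]; exact Or.inl hin)
        · exact h1 (by rw [Bool.or_eq_true]; exact Or.inl hin)
        · exact h2 (by rw [Bool.or_eq_true]; exact Or.inl hin)
        · exact h2 (by rw [Bool.or_eq_true]; exact Or.inr hin)
        · exact h3 (by rw [Bool.or_eq_true]; exact Or.inl hin)
        · exact h4 (by rw [Bool.or_eq_true]; exact Or.inl hin)
        · exact h5 (by rw [Bool.or_eq_true]; exact Or.inl hin)
        · exact h6 (by rw [Bool.or_eq_true]; exact Or.inl hin)
        · exact absurd hrk (by decide)
        · exact absurd hrk (by decide)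
        · exact absurd hrk (by decide)
        · exact absurd hrk (by decide)
      · simp only [pvTagRank, List.mem_cons, List.not_mem_nil, or_false] at hp
        rcases hp with rfl|rfl|rfl|rfl|rfl|rfl|rfl|rfl|rfl|rfl
        · exact h0 (by rw [Bool.or_eq_true]; exact Or.inr hin)
        · exact h1 (by rw [Bool.or_eq_true]; exact Or.inr hin)
        · exact h3 (by rw [Bool.or_eq_true]; exact Or.inr hin)
        · exact h4 (by rw [Bool.or_eq_true]; exact Or.inr hin)
        · exact h5 (by rw [Bool.or_eq_true]; exact Or.inr hin)
        · exact h6 (by rw [Bool.or_eq_true]; exact Or.inr hin)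
        · exact absurd hrk (by decide)
        · exact absurd hrk (by decide)
        · exact absurd hrk (by decide)
        · exact absurd hrk (by decide)
    have hbj : b = 7 := by omega
    rw [hbj]
    rfl
  · -- rank 8: backdoor
    have hle : b ≤ 8 := by
      refine (hiff 8 (by decide)).mpr ?_
      simp only [Bool.or_eq_true] at h8
      rcases h8 with hx | hx
      · exact Or.inl ⟨("backdoor", 8), by exact List.mem_cons_of_mem _ (List.mem_cons_of_mem _ (List.mem_cons_of_mem _ (List.mem_cons_of_mem _ (List.mem_cons_of_mem _ (List.mem_cons_of_mem _ (List.mem_cons_of_mem _ (List.mem_cons_of_mem _ (List.mem_cons_of_mem _ (List.mem_cons_self))))))))), hx, by decide⟩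
      · exact Or.inr ⟨("backdoor", 8), by exact List.mem_cons_of_mem _ (List.mem_cons_of_mem _ (List.mem_cons_of_mem _ (List.mem_cons_of_mem _ (List.mem_cons_of_mem _ (List.mem_cons_of_mem _ (List.mem_cons_of_mem _ (List.mem_cons_self))))))), hx, by decide⟩
    have hne : ¬ b ≤ 7 := by
      intro hc
      rcases (hiff 7 (by decide)).mp hc with ⟨p, hp, hin, hrk⟩ | ⟨p, hp, hin, hrk⟩
      · simp only [pvSubRank, List.mem_cons, List.not_mem_nil, or_false] at hp
        rcases hp with rfl|rfl|rfl|rfl|rfl|rfl|rfl|rfl|rfl|rfl|rfl|rfl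
        · exact h0 (by rw [Bool.or_eq_true]; exact Or.inl hin)
        · exact h1 (by rw [Bool.or_eq_true]; exact Or.inl hin)
        · exact h2 (by rw [Bool.or_eq_true]; exact Or.inl hin)
        · exact h2 (by rw [Bool.or_eq_true]; exact Or.inr hin)
        · exact h3 (by rw [Bool.or_eq_true]; exact Or.inl hin)
        · exact h4 (by rw [Bool.or_eq_true]; exact Or.inl hin)
        · exact h5 (by rw [Bool.or_eq_true]; exact Or.inl hin)
        · exact h6 (by rw [Bool.or_eq_true]; exact Or.inl hin)
        · exact h7 (by rw [Bool.or_eq_true]; exact Or.inl hin)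
        · exact absurd hrk (by decide)
        · exact absurd hrk (by decide)
        · exact absurd hrk (by decide)
      · simp only [pvTagRank, List.mem_cons, List.not_mem_nil, or_false] at hp
        rcases hp with rfl|rfl|rfl|rfl|rfl|rfl|rfl|rfl|rfl|rfl
        · exact h0 (by rw [Bool.or_eq_true]; exact Or.inr hin)
        · exact h1 (by rw [Bool.or_eq_true]; exact Or.inr hin)
        · exact h3 (by rw [Bool.or_eq_true]; exact Or.inr hin)
        · exact h4 (by rw [Bool.or_eq_true]; exact Or.inr hin)
        · exact h5 (by rw [Bool.or_eq_true]; exact Or.inr hin)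
        · exact h6 (by rw [Bool.or_eq_true]; exact Or.inr hin)
        · exact h7 (by rw [Bool.or_eq_true]; exact Or.inr hin)
        · exact absurd hrk (by decide)
        · exact absurd hrk (by decide)
        · exact absurd hrk (by decide)
    have hbj : b = 8 := by omega
    rw [hbj]
    rfl
  · -- rank 9: trojan
    have hle : b ≤ 9 := by
      refine (hiff 9 (by decide)).mpr ?_
      simp only [Bool.or_eq_true] at h9
      rcases h9 with hx | hx
      · exact Or.inl ⟨("trojan", 9), by exact List.mem_cons_of_mem _ (List.mem_cons_of_mem _ (List.mem_cons_of_mem _ (List.mem_cons_of_mem _ (List.mem_cons_of_mem _ (List.mem_cons_of_mem _ (List.mem_cons_of_mem _ (List.mem_cons_of_mem _ (List.mem_cons_of_mem _ (List.mem_cons_of_mem _ (List.mem_cons_self)))))))))), hx, by decide⟩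
      · exact Or.inr ⟨("trojan", 9), by exact List.mem_cons_of_mem _ (List.mem_cons_of_mem _ (List.mem_cons_of_mem _ (List.mem_cons_of_mem _ (List.mem_cons_of_mem _ (List.mem_cons_of_mem _ (List.mem_cons_of_mem _ (List.mem_cons_of_mem _ (List.mem_cons_self)))))))), hx, by decide⟩
    have hne : ¬ b ≤ 8 := by
      intro hc
      rcases (hiff 8 (by decide)).mp hc with ⟨p, hp, hin, hrk⟩ | ⟨p, hp, hin, hrk⟩
      · simp only [pvSubRank, List.mem_cons, List.not_mem_nil, or_false] at hp
        rcases hp with rfl|rfl|rfl|rfl|rfl|rfl|rfl|rfl|rfl|rfl|rfl|rfl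
        · exact h0 (by rw [Bool.or_eq_true]; exact Or.inl hin)
        · exact h1 (by rw [Bool.or_eq_true]; exact Or.inl hin)
        · exact h2 (by rw [Bool.or_eq_true]; exact Or.inl hin)
        · exact h2 (by rw [Bool.or_eq_true]; exact Or.inr hin)
        · exact h3 (by rw [Bool.or_eq_true]; exact Or.inl hin)
        · exact h4 (by rw [Bool.or_eq_true]; exact Or.inl hin)
        · exact h5 (by rw [Bool.or_eq_true]; exact Or.inl hin)
        · exact h6 (by rw [Bool.or_eq_true]; exact Or.inl hin)
        · exact h7 (by rw [Bool.or_eq_true]; exact Or.inl hin)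
        · exact h8 (by rw [Bool.or_eq_true]; exact Or.inl hin)
        · exact absurd hrk (by decide)
        · exact absurd hrk (by decide)
      · simp only [pvTagRank, List.mem_cons, List.not_mem_nil, or_false] at hp
        rcases hp with rfl|rfl|rfl|rfl|rfl|rfl|rfl|rfl|rfl|rfl
        · exact h0 (by rw [Bool.or_eq_true]; exact Or.inr hin)
        · exact h1 (by rw [Bool.or_eq_true]; exact Or.inr hin)
        · exact h3 (by rw [Bool.or_eq_true]; exact Or.inr hin)
        · exact h4 (by rw [Bool.or_eq_true]; exact Or.inr hin)
        · exact h5 (by rw [Bool.or_eq_true]; exact Or.inr hin)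
        · exact h6 (by rw [Bool.or_eq_true]; exact Or.inr hin)
        · exact h7 (by rw [Bool.or_eq_true]; exact Or.inr hin)
        · exact h8 (by rw [Bool.or_eq_true]; exact Or.inr hin)
        · exact absurd hrk (by decide)
        · exact absurd hrk (by decide)
    have hbj : b = 9 := by omega
    rw [hbj]
    rfl
  · -- rank 10: cryptominer
    have hle : b ≤ 10 := by
      refine (hiff 10 (by decide)).mpr ?_
      simp only [Bool.or_eq_true] at h10
      rcases h10 with hx | hx
      · exact Or.inl ⟨("miner", 10), by exact List.mem_cons_of_mem _ (List.mem_cons_of_mem _ (List.mem_cons_of_mem _ (List.mem_cons_of_mem _ (List.mem_cons_of_mem _ (List.mem_cons_of_mem _ (List.mem_cons_of_mem _ (List.mem_cons_of_mem _ (List.mem_cons_of_mem _ (List.mem_cons_of_mem _ (List.mem_cons_of_mem _ (List.mem_cons_self))))))))))), hx, by decide⟩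
      · exact Or.inr ⟨("cryptominer", 10), by exact List.mem_cons_of_mem _ (List.mem_cons_of_mem _ (List.mem_cons_of_mem _ (List.mem_cons_of_mem _ (List.mem_cons_of_mem _ (List.mem_cons_of_mem _ (List.mem_cons_of_mem _ (List.mem_cons_of_mem _ (List.mem_cons_of_mem _ (List.mem_cons_self))))))))), hx, by decide⟩
    have hne : ¬ b ≤ 9 := by
      intro hc
      rcases (hiff 9 (by decide)).mp hc with ⟨p, hp, hin, hrk⟩ | ⟨p, hp, hin, hrk⟩
      · simp only [pvSubRank, List.mem_cons, List.not_mem_nil, or_false] at hp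
        rcases hp with rfl|rfl|rfl|rfl|rfl|rfl|rfl|rfl|rfl|rfl|rfl|rfl
        · exact h0 (by rw [Bool.or_eq_true]; exact Or.inl hin)
        · exact h1 (by rw [Bool.or_eq_true]; exact Or.inl hin)
        · exact h2 (by rw [Bool.or_eq_true]; exact Or.inl hin)
        · exact h2 (by rw [Bool.or_eq_true]; exact Or.inr hin)
        · exact h3 (by rw [Bool.or_eq_true]; exact Or.inl hin)
        · exact h4 (by rw [Bool.or_eq_true]; exact Or.inl hin)
        · exact h5 (by rw [Bool.or_eq_true]; exact Or.inl hin)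
        · exact h6 (by rw [Bool.or_eq_true]; exact Or.inl hin)
        · exact h7 (by rw [Bool.or_eq_true]; exact Or.inl hin)
        · exact h8 (by rw [Bool.or_eq_true]; exact Or.inl hin)
        · exact h9 (by rw [Bool.or_eq_true]; exact Or.inl hin)
        · exact absurd hrk (by decide)
      · simp only [pvTagRank, List.mem_cons, List.not_mem_nil, or_false] at hp
        rcases hp with rfl|rfl|rfl|rfl|rfl|rfl|rfl|rfl|rfl|rfl
        · exact h0 (by rw [Bool.or_eq_true]; exact Or.inr hin)
        · exact h1 (by rw [Bool.or_eq_true]; exact Or.inr hin)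
        · exact h3 (by rw [Bool.or_eq_true]; exact Or.inr hin)
        · exact h4 (by rw [Bool.or_eq_true]; exact Or.inr hin)
        · exact h5 (by rw [Bool.or_eq_true]; exact Or.inr hin)
        · exact h6 (by rw [Bool.or_eq_true]; exact Or.inr hin)
        · exact h7 (by rw [Bool.or_eq_true]; exact Or.inr hin)
        · exact h8 (by rw [Bool.or_eq_true]; exact Or.inr hin)
        · exact h9 (by rw [Bool.or_eq_true]; exact Or.inr hin)
        · exact absurd hrk (by decide)
    have hbj : b = 10 := by omega
    rw [hbj]
    rfl
  · -- nothing matched: rank 11 → "malware"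
    have hne : ¬ b ≤ 10 := by
      intro hc
      rcases (hiff 10 (by decide)).mp hc with ⟨p, hp, hin, hrk⟩ | ⟨p, hp, hin, hrk⟩
      · simp only [pvSubRank, List.mem_cons, List.not_mem_nil, or_false] at hp
        rcases hp with rfl|rfl|rfl|rfl|rfl|rfl|rfl|rfl|rfl|rfl|rfl|rfl
        · exact h0 (by rw [Bool.or_eq_true]; exact Or.inl hin)
        · exact h1 (by rw [Bool.or_eq_true]; exact Or.inl hin)
        · exact h2 (by rw [Bool.or_eq_true]; exact Or.inl hin)
        · exact h2 (by rw [Bool.or_eq_true]; exact Or.inr hin)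
        · exact h3 (by rw [Bool.or_eq_true]; exact Or.inl hin)
        · exact h4 (by rw [Bool.or_eq_true]; exact Or.inl hin)
        · exact h5 (by rw [Bool.or_eq_true]; exact Or.inl hin)
        · exact h6 (by rw [Bool.or_eq_true]; exact Or.inl hin)
        · exact h7 (by rw [Bool.or_eq_true]; exact Or.inl hin)
        · exact h8 (by rw [Bool.or_eq_true]; exact Or.inl hin)
        · exact h9 (by rw [Bool.or_eq_true]; exact Or.inl hin)
        · exact h10 (by rw [Bool.or_eq_true]; exact Or.inl hin)
      · simp only [pvTagRank, List.mem_cons, List.not_mem_nil, or_false] at hp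
        rcases hp with rfl|rfl|rfl|rfl|rfl|rfl|rfl|rfl|rfl|rfl
        · exact h0 (by rw [Bool.or_eq_true]; exact Or.inr hin)
        · exact h1 (by rw [Bool.or_eq_true]; exact Or.inr hin)
        · exact h3 (by rw [Bool.or_eq_true]; exact Or.inr hin)
        · exact h4 (by rw [Bool.or_eq_true]; exact Or.inr hin)
        · exact h5 (by rw [Bool.or_eq_true]; exact Or.inr hin)
        · exact h6 (by rw [Bool.or_eq_true]; exact Or.inr hin)
        · exact h7 (by rw [Bool.or_eq_true]; exact Or.inr hin)
        · exact h8 (by rw [Bool.or_eq_true]; exact Or.inr hin)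
        · exact h9 (by rw [Bool.or_eq_true]; exact Or.inr hin)
        · exact h10 (by rw [Bool.or_eq_true]; exact Or.inr hin)
    have hbj : b = 11 := by omega
    rw [hbj]
    rfl
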